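-- pv_equiv track=rewrite | github.com/krismaz/Thesis | Other/BitonicLayouter.py | compses
-- ===== SOURCE A (Python) =====
-- def compses(start, off, depth, asc, count = 0):
-- 	up = 'lo + i{}'.format(start)
-- 	down = 'lo + i{} + {}'.format(start, off)
-- 	if not asc:
-- 		up, down = down, up
-- 	result = ['\t\t\tCompareAndExchange2way(Array, {} , {} );'.format(up, down)]
-- 	if depth != 0:
-- 		bla = 'm/{}'.format(2**(count+1))
-- 		result += compses(start, bla, depth-1, asc,  count + 1)
-- 		result += compses(start + ' + ' + off, bla, depth-1, asc, count + 1)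
-- 	return result
-- ===== SOURCE B (Python) =====
-- def compses(start, off, depth, asc, count = 0):
--     # Explicit LIFO stack of frames instead of recursion; preorder preserved by
--     # pushing the right child before the left.
--     result = []
--     stack = [(start, off, depth, count)]
--     while stack:
--         s, o, d, c = stack.pop()
--         up = 'lo + i{}'.format(s)
--         down = 'lo + i{} + {}'.format(s, o)
--         if not asc:
--             up, down = down, up
--         result.append('\t\t\tCompareAndExchange2way(Array, {} , {} );'.format(up, down))
--         if d > 0:
--             bla = 'm/{}'.format(2**(c+1))
--             stack.append((s + ' + ' + o, bla, d-1, c+1))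
--             stack.append((s, bla, d-1, c+1))
--     return result
-- ===== Notes on version B (the rewrite author's own statement) =====
-- stated objective: alternative
-- what changed: Replaces A's recursion with an explicit LIFO stack of (start, off, depth, count) frames popped in a while loop, pushing the right child before the left so the preorder output is preserved.
import Mathlib
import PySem

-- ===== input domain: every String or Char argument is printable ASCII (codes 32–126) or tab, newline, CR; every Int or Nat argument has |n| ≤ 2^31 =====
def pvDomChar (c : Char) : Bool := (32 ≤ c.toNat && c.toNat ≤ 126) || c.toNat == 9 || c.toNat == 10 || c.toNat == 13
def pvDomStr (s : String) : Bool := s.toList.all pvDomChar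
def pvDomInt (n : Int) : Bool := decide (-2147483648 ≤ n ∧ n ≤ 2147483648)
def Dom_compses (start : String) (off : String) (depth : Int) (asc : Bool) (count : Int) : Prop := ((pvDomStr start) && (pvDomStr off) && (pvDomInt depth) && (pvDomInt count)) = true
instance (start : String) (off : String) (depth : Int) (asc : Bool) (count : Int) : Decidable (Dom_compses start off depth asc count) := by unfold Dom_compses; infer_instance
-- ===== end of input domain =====

-- B replaces A's recursion by an explicit LIFO stack of frames popped in a loop (preorder
-- preserved by pushing the right child first); objective: alternative decomposition, same cost.

-- ===== PORT A =====
-- Literal port of A's recursion; the Int recursion depth is carried as the Nat fuel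
-- depth.toNat (exact for depth ≥ 0, which Pre_ guarantees; for depth < 0 Python A raises
-- RecursionError, excluded by Pre_).  2**(count+1) is ported as 2 ^ (count+1).toNat,
-- exact whenever count+1 ≥ 0 (Pre_ guarantees this on every recursive call; for smaller
-- count Python's 2** yields a float, excluded by Pre_).
def compsesGo (start : String) (off : String) (fuel : Nat) (asc : Bool) (count : Int) : List String :=
  let up := "lo + i" ++ start
  let down := "lo + i" ++ start ++ " + " ++ off
  let (up, down) := if !asc then (down, up) else (up, down)
  let result := ["\t\t\tCompareAndExchange2way(Array, " ++ up ++ " , " ++ down ++ " );"]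
  match fuel with
  | 0 => result
  | f + 1 =>
      let bla := "m/" ++ PySem.Int.toStr (2 ^ (count + 1).toNat)
      result ++ compsesGo start bla f asc (count + 1)
             ++ compsesGo (start ++ " + " ++ off) bla f asc (count + 1)

def compses (start : String) (off : String) (depth : Int) (asc : Bool) (count : Int) : List String :=
  compsesGo start off depth.toNat asc count

-- ===== PORT B =====
-- Frame = (start, off, depth, count); head of the list is the top of the stack.
-- The while loop is ported as structural recursion on a fuel that merely makes the loop
-- total: pvSteps depth.toNat = 2^(depth.toNat+1) - 1 is exactly the number of iterations
-- B's loop performs (proved below: the fuel is never exhausted), so the fuel is a pure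
-- totality guard, not part of the algorithm.
def pvSteps (n : Nat) : Nat := 2 ^ (n + 1) - 1

def compsesAltGo (asc : Bool) : Nat → List (String × String × Int × Int) → List String → List String
  | _, [], result => result
  | 0, _ :: _, result => result
  | fuel + 1, (s, o, d, c) :: rest, result =>
      let up := "lo + i" ++ s
      let down := "lo + i" ++ s ++ " + " ++ o
      let (up, down) := if !asc then (down, up) else (up, down)
      let result := result ++ ["\t\t\tCompareAndExchange2way(Array, " ++ up ++ " , " ++ down ++ " );"]
      if 0 < d then
        let bla := "m/" ++ PySem.Int.toStr (2 ^ (c + 1).toNat)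
        compsesAltGo asc fuel ((s, bla, d - 1, c + 1) :: (s ++ " + " ++ o, bla, d - 1, c + 1) :: rest) result
      else
        compsesAltGo asc fuel rest result

def compses_alt (start : String) (off : String) (depth : Int) (asc : Bool) (count : Int) : List String :=
  compsesAltGo asc (pvSteps depth.toNat) [(start, off, depth, count)] []

-- ===== PRECONDITION & SPEC =====
-- Pre_ excludes depth < 0, where Python A raises RecursionError, and count ≤ -2 with
-- depth ≠ 0, where 2**(count+1) is a Python float so A's strings embed a float repr
-- that is not portable (A and B return the same value there).
def Pre_compses (start : String) (off : String) (depth : Int) (asc : Bool) (count : Int) : Prop :=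
  0 ≤ depth ∧ (depth = 0 ∨ -1 ≤ count)
instance (start : String) (off : String) (depth : Int) (asc : Bool) (count : Int) : Decidable (Pre_compses start off depth asc count) := by unfold Pre_compses; infer_instance

def pvWitness_compses : String × String × Int × Bool × Int := ("", "m", 2, true, 0)

def Spec_compses (start : String) (off : String) (depth : Int) (asc : Bool) (count : Int) (out : List String) : Prop := out = compses_alt start off depth asc count
instance (start : String) (off : String) (depth : Int) (asc : Bool) (count : Int) (out : List String) : Decidable (Spec_compses start off depth asc count out) := by unfold Spec_compses; infer_instance

-- ===== CLAIM (what is proved, stated in full; the proofs are below) =====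
def Claim_equal_compses : Prop := ∀ (start : String) (off : String) (depth : Int) (asc : Bool) (count : Int), Dom_compses start off depth asc count → Pre_compses start off depth asc count → Spec_compses start off depth asc count (compses start off depth asc count)
-- ===== LEMMAS AND PROOFS =====

-- pvSteps satisfies the loop recurrence.
theorem pvSteps_succ (n : Nat) : pvSteps (n + 1) = 2 * pvSteps n + 1 := by
  unfold pvSteps
  have h := Nat.one_le_two_pow (n := n + 1)
  have : 2 ^ (n + 1 + 1) = 2 * 2 ^ (n + 1) := by ring
  omega

-- Popping one frame of the stack consumes exactly its share of the fuel and contributes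
-- exactly the recursive result of that frame.
theorem compsesAltGo_frame (asc : Bool) :
    ∀ (n : Nat) (s o : String) (d : Int) (c : Int), d.toNat = n →
      ∀ (fuel : Nat) (rest : List (String × String × Int × Int)) (acc : List String),
        compsesAltGo asc (fuel + pvSteps n) ((s, o, d, c) :: rest) acc
          = compsesAltGo asc fuel rest (acc ++ compsesGo s o n asc c) := by
  intro n
  induction n with
  | zero =>
      intro s o d c hd fuel rest acc
      have hdle : ¬ 0 < d := by omega
      have h1 : fuel + pvSteps 0 = fuel + 1 := by unfold pvSteps; norm_num
      rw [h1, compsesAltGo]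
      simp only [hdle, if_false, compsesGo]
  | succ f ih =>
      intro s o d c hd fuel rest acc
      have hdpos : 0 < d := by omega
      have hd1 : (d - 1).toNat = f := by omega
      have h1 : fuel + pvSteps (f + 1) = ((fuel + pvSteps f) + pvSteps f) + 1 := by
        rw [pvSteps_succ]; omega
      rw [h1, compsesAltGo]
      simp only [hdpos, if_true]
      rw [ih _ _ _ _ hd1, ih _ _ _ _ hd1]
      conv_rhs => rw [compsesGo]
      simp [List.append_assoc]

theorem compses_eq_alt (start off : String) (depth : Int) (asc : Bool) (count : Int) :
    compses start off depth asc count = compses_alt start off depth asc count := by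
  unfold compses compses_alt
  have h0 : pvSteps depth.toNat = 0 + pvSteps depth.toNat := by omega
  rw [h0, compsesAltGo_frame asc depth.toNat start off depth count rfl 0 [] []]
  rw [compsesAltGo]
  simp

-- ===== VERDICT (by name: the statement is the Claim_ definition above) =====
theorem compses_spec : Claim_equal_compses := by
  intro start off depth asc count _ _
  unfold Spec_compses
  exact compses_eq_alt start off depth asc count
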